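-- pv_equiv track=rewrite | github.com/RobertoReale/code-style-converter | C Style Converter (Allman ↔ K&R).py | to_knr
-- ===== SOURCE A (Python) =====
-- def to_knr(code: str) -> str:
--     """Convert code from Allman style to K&R style."""
--     try:
--         lines = code.split('\n')
--         formatted_lines = []
--         skip_next = False
--
--         for i, line in enumerate(lines):
--             if skip_next:
--                 skip_next = False
--                 continue
--
--             stripped = line.lstrip()
--
--             # If next line is just a '{', combine them
--             if (i < len(lines) - 1 and
--                 lines[i + 1].strip() == '{'):
--                 formatted_lines.append(line.rstrip() + ' {')
--                 skip_next = True
--             else: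
--                 formatted_lines.append(line)
--
--         return '\n'.join(formatted_lines)
--
--     except Exception as e:
--         raise ValueError(f"Error converting to K&R style: {str(e)}")
-- ===== SOURCE B (Python) =====
-- def to_knr(code: str) -> str:
--     """Convert code from Allman style to K&R style (look-behind merge)."""
--     result = []
--     prev_merged = False
--     for line in code.split('\n'):
--         if line.strip() == '{' and not prev_merged and result:
--             result[-1] = result[-1].rstrip() + ' {'
--             prev_merged = True
--         else:
--             result.append(line)
--             prev_merged = False
--     return '\n'.join(result)
-- ===== Notes on version B (the rewrite author's own statement) =====
-- stated objective: alternative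
-- what changed: Replaces A's look-ahead (peek at the following line plus a skip_next flag that suppresses the next iteration) by a look-behind fold: each line that strips to a lone opening brace is merged into the already-emitted previous line of the accumulator, guarded by a prev_merged flag; the dead try/except wrapper is dropped.
import Mathlib
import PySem

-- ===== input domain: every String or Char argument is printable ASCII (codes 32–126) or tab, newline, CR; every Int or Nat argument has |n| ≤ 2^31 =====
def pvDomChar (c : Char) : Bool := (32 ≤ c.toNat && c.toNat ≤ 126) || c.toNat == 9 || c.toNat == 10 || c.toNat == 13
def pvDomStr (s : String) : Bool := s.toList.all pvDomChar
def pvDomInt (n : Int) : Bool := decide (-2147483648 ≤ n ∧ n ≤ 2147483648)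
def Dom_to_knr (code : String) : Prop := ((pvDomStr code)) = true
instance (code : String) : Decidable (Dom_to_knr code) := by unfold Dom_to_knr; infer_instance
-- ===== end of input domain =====

-- B replaces A's look-ahead + skip_next loop by a look-behind merge into the output accumulator; alternative decomposition, same cost.

-- ===== PORT A =====
-- A's loop body: skip_next flag, lookahead at lines[i+1]
def stepA (lines : List String) (st : List String × Bool) (il : Int × String) : List String × Bool :=
  if st.2 then (st.1, false)
  else
    if il.1 < (lines.length : Int) - 1 ∧
       PySem.Str.strip ((PySem.List.pyGet? lines (il.1 + 1)).getD "") = "{"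
    then (st.1 ++ [PySem.Str.rstrip il.2 ++ " {"], true)
    else (st.1 ++ [il.2], false)

-- literal port of A: indexed loop (enumerate) with lookahead and skip_next
def to_knr (code : String) : String :=
  let lines := (PySem.Str.split? code "\n").getD []
  PySem.Str.join "\n" ((PySem.List.enumerate lines).foldl (stepA lines) ([], false)).1

-- ===== PORT B =====
-- B's loop body: look-behind merge guarded by prev_merged; result[-1] assignment is dropLast ++ [new last]
def stepB (st : List String × Bool) (line : String) : List String × Bool :=
  if PySem.Str.strip line = "{" ∧ st.2 = false ∧ st.1 ≠ []
  then (st.1.dropLast ++ [PySem.Str.rstrip (st.1.getLast?.getD "") ++ " {"], true)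
  else (st.1 ++ [line], false)

-- literal port of Source B: single forward fold with (result, prev_merged) state
def to_knr_alt (code : String) : String :=
  PySem.Str.join "\n" ((((PySem.Str.split? code "\n").getD []).foldl stepB ([], false)).1)

-- ===== PRECONDITION & SPEC =====
def Spec_to_knr (code : String) (out : String) : Prop := out = to_knr_alt code
instance (code : String) (out : String) : Decidable (Spec_to_knr code out) := by unfold Spec_to_knr; infer_instance

-- ===== CLAIM (what is proved, stated in full; the proofs are below) =====
def Claim_equal_to_knr : Prop := ∀ (code : String), Dom_to_knr code → Spec_to_knr code (to_knr code)

-- ===== LEMMAS AND PROOFS =====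

-- the common specification: the lines both loops emit (proof-only helper)
def hA : List String → Bool → List String
  | [], _ => []
  | _ :: r, true => hA r false
  | x :: r, false =>
      match r with
      | [] => [x]
      | y :: _ =>
          if PySem.Str.strip y = "{" then (PySem.Str.rstrip x ++ " {") :: hA r true
          else x :: hA r false

@[simp] theorem hA_nil (b : Bool) : hA [] b = [] := rfl
@[simp] theorem hA_cons_true (x : String) (r : List String) : hA (x :: r) true = hA r false := by
  simp [hA]
@[simp] theorem hA_singleton_false (x : String) : hA [x] false = [x] := rfl
theorem hA_cons_cons_false (x y : String) (r : List String) :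
    hA (x :: y :: r) false =
      if PySem.Str.strip y = "{" then (PySem.Str.rstrip x ++ " {") :: hA (y :: r) true
      else x :: hA (y :: r) false := rfl

theorem lemA (lines : List String) :
    ∀ (rest : List String) (k : Nat) (acc : List String) (skip : Bool),
    rest = lines.drop k →
    ((PySem.List.enumerate rest (k : Int)).foldl (stepA lines) (acc, skip)).1 = acc ++ hA rest skip := by
  intro rest
  induction rest with
  | nil => intro k acc skip _; simp [PySem.List.enumerate]
  | cons x r ih =>
    intro k acc skip h
    have hdrop : r = lines.drop (k + 1) := by
      have := congrArg List.tail h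
      simpa [List.tail_drop] using this
    have hk : k < lines.length := by
      by_contra hk
      have : lines.drop k = [] := List.drop_eq_nil_of_le (by omega)
      rw [this] at h; exact List.cons_ne_nil x r h
    have hlen : lines.length = k + 1 + r.length := by
      have h1 : (lines.drop k).length = lines.length - k := List.length_drop
      rw [← h] at h1; simp at h1; omega
    have hcast : ((k : Int) + 1) = ((k + 1 : Nat) : Int) := by push_cast; ring
    have hget : (PySem.List.pyGet? lines ((k : Int) + 1)).getD "" = (r[0]?).getD "" := by
      rw [hcast, PySem.List.pyGet?_natCast]
      congr 1
      rw [hdrop, List.getElem?_drop]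
    rw [PySem.List.enumerate_cons, List.foldl_cons]
    cases skip with
    | true =>
      have hstep : stepA lines (acc, true) ((k : Int), x) = (acc, false) := by simp [stepA]
      rw [hstep, hcast, ih (k + 1) acc false hdrop, hA_cons_true]
    | false =>
      cases r with
      | nil =>
        have hcond : ¬ ((k : Int) < (lines.length : Int) - 1 ∧
            PySem.Str.strip ((PySem.List.pyGet? lines ((k : Int) + 1)).getD "") = "{") := by
          rintro ⟨h1, -⟩
          simp at hlen
          omega
        have hstep : stepA lines (acc, false) ((k : Int), x) = (acc ++ [x], false) := by
          simp only [stepA]; rw [if_neg (by simp), if_neg hcond]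
        rw [hstep, hcast, ih (k + 1) (acc ++ [x]) false hdrop]
        simp
      | cons y r' =>
        have hlt : (k : Int) < (lines.length : Int) - 1 := by
          simp at hlen; omega
        have hget' : (PySem.List.pyGet? lines ((k : Int) + 1)).getD "" = y := by
          rw [hget]; rfl
        by_cases hy : PySem.Str.strip y = "{"
        · have hstep : stepA lines (acc, false) ((k : Int), x) =
              (acc ++ [PySem.Str.rstrip x ++ " {"], true) := by
            simp only [stepA]
            rw [if_neg (by simp), if_pos ⟨hlt, by rw [hget']; exact hy⟩]
          rw [hstep, hcast, ih (k + 1) _ true hdrop, hA_cons_cons_false, if_pos hy]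
          simp
        · have hstep : stepA lines (acc, false) ((k : Int), x) = (acc ++ [x], false) := by
            simp only [stepA]
            rw [if_neg (by simp), if_neg (by intro ⟨_, h2⟩; rw [hget'] at h2; exact hy h2)]
          rw [hstep, hcast, ih (k + 1) _ false hdrop, hA_cons_cons_false, if_neg hy]
          simp
  
theorem lemB : ∀ (ls : List String),
    (∀ (init : List String) (p : String),
      (ls.foldl stepB (init ++ [p], false)).1 = init ++ hA (p :: ls) false) ∧
    (∀ (res : List String), (ls.foldl stepB (res, true)).1 = res ++ hA ls false) := by
  intro ls
  induction ls with
  | nil => exact ⟨fun init p => by simp, fun res => by simp⟩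
  | cons x r ih =>
    constructor
    · intro init p
      by_cases hx : PySem.Str.strip x = "{"
      · have hstep : stepB (init ++ [p], false) x =
            (init ++ [PySem.Str.rstrip p ++ " {"], true) := by
          simp only [stepB]
          rw [if_pos ⟨hx, by trivial, by simp⟩]
          simp
        rw [List.foldl_cons, hstep, (ih.2 _), hA_cons_cons_false, if_pos hx]
        simp
      · have hstep : stepB (init ++ [p], false) x = (init ++ [p] ++ [x], false) := by
          simp only [stepB]
          rw [if_neg (by intro hc; exact hx hc.1)]
        rw [List.foldl_cons, hstep, ih.1 (init ++ [p]) x, hA_cons_cons_false, if_neg hx]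
        simp
    · intro res
      have hstep : stepB (res, true) x = (res ++ [x], false) := by
        simp only [stepB]
        rw [if_neg (by simp)]
      rw [List.foldl_cons, hstep, ih.1 res x]

theorem foldB_base (ls : List String) : (ls.foldl stepB ([], false)).1 = hA ls false := by
  cases ls with
  | nil => rfl
  | cons x r =>
    have hstep : stepB ([], false) x = ([x], false) := by
      simp only [stepB]
      rw [if_neg (by intro hc; exact hc.2.2 rfl)]
      rfl
    rw [List.foldl_cons, hstep]
    have := (lemB r).1 [] x
    simpa using this

theorem foldA_base (lines : List String) :
    ((PySem.List.enumerate lines).foldl (stepA lines) ([], false)).1 = hA lines false := by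
  have := lemA lines lines 0 [] false (by simp)
  simpa using this

-- ===== VERDICT (by name: the statement is the Claim_ definition above) =====
theorem to_knr_spec : Claim_equal_to_knr := by
  intro code _
  simp only [Spec_to_knr, to_knr, to_knr_alt, foldA_base, foldB_base]
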